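-- pv_equiv track=rewrite | github.com/Espresso-Kp/RustRepoTrans | Dataset_Construction/extract_function.py | extract_functions_from_code_rb
-- ===== SOURCE A (Python) =====
-- def extract_functions_from_code_rb(code):
--     lines = code.split('\n')
--     functions = []
--     function_code = []
--     inside_function = False
--
--     for line in lines:
--         if not inside_function and line.lstrip().startswith("def "):
--             # 获取函数起始的缩进长度
--             pre_cnt = len(line) - len(line.lstrip())
--             function_code.append(line)
--             inside_function = True
--             # 跳过def那一行
--             continue
--
--         if inside_function:
--             if len(line) - len(line.lstrip()) == pre_cnt and line.lstrip().startswith("end"):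
--                 inside_function = False
--                 functions.append('\n'.join(function_code))
--                 function_code = []
--             else:
--                 function_code.append(line)
--
--     return functions
-- ===== SOURCE B (Python) =====
-- def extract_functions_from_code_rb(code):
--     lines = code.split('\n')
--     n = len(lines)
--     functions = []
--     i = 0
--     while i < n:
--         line = lines[i]
--         stripped = line.lstrip()
--         if stripped.startswith("def "):
--             pre_cnt = len(line) - len(stripped)
--             group = [line]
--             j = i + 1
--             while j < n:
--                 l = lines[j]
--                 ls = l.lstrip()
--                 if len(l) - len(ls) == pre_cnt and ls.startswith("end"):
--                     break
--                 group.append(l)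
--                 j += 1
--             if j < n:
--                 functions.append('\n'.join(group))
--                 i = j + 1
--             else:
--                 break
--         else:
--             i += 1
--     return functions
-- ===== Notes on version B (the rewrite author's own statement) =====
-- stated objective: alternative
-- what changed: Replaced the single-pass state machine with an inside_function flag by an index-based find-then-scan: an outer loop looks for 'def ' lines and, for each, an inner loop scans forward to the matching same-indentation 'end' line, emitting the joined group (unterminated groups are dropped when the inner scan hits the end of input).
import Mathlib
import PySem

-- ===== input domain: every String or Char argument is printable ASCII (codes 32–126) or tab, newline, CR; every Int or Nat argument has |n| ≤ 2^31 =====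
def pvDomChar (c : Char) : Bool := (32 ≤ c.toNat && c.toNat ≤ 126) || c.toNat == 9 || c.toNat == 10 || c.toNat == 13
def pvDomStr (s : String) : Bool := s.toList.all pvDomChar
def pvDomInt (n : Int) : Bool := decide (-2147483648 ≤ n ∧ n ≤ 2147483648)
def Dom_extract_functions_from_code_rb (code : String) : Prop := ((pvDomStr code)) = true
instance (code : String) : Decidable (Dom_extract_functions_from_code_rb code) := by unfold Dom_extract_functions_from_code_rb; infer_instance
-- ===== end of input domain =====

-- B replaces A's single-pass inside_function state machine with a find-then-scan: find a 'def ' line, then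
-- an inner scan to the matching same-indentation 'end' line; return value only, no side effects.

-- ===== PORT A =====
-- the three per-line tests (both Pythons contain these expressions verbatim)
def pvIndent (l : String) : Int := PySem.Str.len l - PySem.Str.len (PySem.Str.lstrip l)
def pvIsDef (l : String) : Bool := PySem.Str.startswith (PySem.Str.lstrip l) "def "
def pvIsEnd (pre : Int) (l : String) : Bool :=
  (pvIndent l == pre) && PySem.Str.startswith (PySem.Str.lstrip l) "end"

-- state: (functions, function_code, inside_function, pre_cnt)
def pvStepA (st : List String × List String × Bool × Int) (line : String) :
    List String × List String × Bool × Int :=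
  match st with
  | (fs, fc, inside, pre) =>
    if !inside && pvIsDef line then
      (fs, fc ++ [line], true, pvIndent line)
    else if inside then
      if pvIsEnd pre line then
        (fs ++ [PySem.Str.join "\n" fc], [], false, pre)
      else
        (fs, fc ++ [line], inside, pre)
    else (fs, fc, inside, pre)

def extract_functions_from_code_rb (code : String) : List String :=
  (((PySem.Str.split? code "\n").getD []).foldl pvStepA ([], [], false, 0)).1

-- ===== PORT B =====
-- inner scan: advance through the remaining lines collecting the group until a line with indentation
-- pre whose lstrip starts with "end"; none if the end of input is reached first (group dropped).
def pvScanBody (pre : Int) : List String → List String → Option (List String × List String)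
  | [], _ => none
  | l :: rest, group =>
    if pvIsEnd pre l then
      some (group, rest)
    else
      pvScanBody pre rest (group ++ [l])

-- termination helper for pvOuter (cited by name in its decreasing_by)
theorem pvScanBody_length_lt (pre : Int) :
    ∀ (lines group grp rest' : List String),
      pvScanBody pre lines group = some (grp, rest') → rest'.length < lines.length := by
  intro lines
  induction lines with
  | nil => intro group grp rest' h; simp [pvScanBody] at h
  | cons l rest ih =>
    intro group grp rest' h
    simp only [pvScanBody] at h
    split at h
    · cases h; simp
    · exact Nat.lt_succ_of_lt (ih _ _ _ h)

-- outer scan: look for the next 'def ' line, run the inner scan from the line after it.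
def pvOuter : List String → List String
  | [] => []
  | line :: rest =>
    if pvIsDef line then
      match h : pvScanBody (pvIndent line) rest [line] with
      | some (group, rest') => PySem.Str.join "\n" group :: pvOuter rest'
      | none => []
    else
      pvOuter rest
  termination_by lines => lines.length
  decreasing_by
  · exact Nat.lt_succ_of_lt (pvScanBody_length_lt _ _ _ _ _ h)
  · simp

def extract_functions_from_code_rb_alt (code : String) : List String :=
  pvOuter ((PySem.Str.split? code "\n").getD [])

-- ===== PRECONDITION & SPEC =====
def Spec_extract_functions_from_code_rb (code : String) (out : List String) : Prop := out = extract_functions_from_code_rb_alt code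
instance (code : String) (out : List String) : Decidable (Spec_extract_functions_from_code_rb code out) := by unfold Spec_extract_functions_from_code_rb; infer_instance

-- ===== CLAIM (what is proved, stated in full; the proofs are below) =====
def Claim_equal_extract_functions_from_code_rb : Prop := ∀ (code : String), Dom_extract_functions_from_code_rb code → Spec_extract_functions_from_code_rb code (extract_functions_from_code_rb code)

-- ===== LEMMAS AND PROOFS =====

-- A's fold, started in the inside_function state, behaves as B's inner scan.
theorem pv_foldl_inside (pre : Int) :
    ∀ (lines group fs : List String),
      (lines.foldl pvStepA (fs, group, true, pre)).1 =
        (match pvScanBody pre lines group with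
         | some (grp, rest) =>
             (rest.foldl pvStepA (fs ++ [PySem.Str.join "\n" grp], [], false, pre)).1
         | none => fs) := by
  intro lines
  induction lines with
  | nil => intro group fs; simp [pvScanBody]
  | cons l rest ih =>
    intro group fs
    by_cases hend : pvIsEnd pre l = true
    · simp [List.foldl, pvStepA, pvScanBody, hend]
    · simp only [List.foldl, pvStepA, pvScanBody, hend, Bool.false_and, Bool.not_true,
        if_false, if_true]
      exact ih (group ++ [l]) fs

-- A's fold, started outside a function, behaves as B's outer scan.
theorem pv_foldl_outer :
    ∀ (n : Nat) (lines : List String), lines.length ≤ n → ∀ (fs : List String) (pre : Int),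
      (lines.foldl pvStepA (fs, [], false, pre)).1 = fs ++ pvOuter lines := by
  intro n
  induction n with
  | zero =>
    intro lines hlen fs pre
    have : lines = [] := List.eq_nil_of_length_eq_zero (Nat.le_zero.mp hlen)
    subst this; simp [pvOuter]
  | succ n ih =>
    intro lines hlen fs pre
    match lines with
    | [] => simp [pvOuter]
    | l :: rest =>
      by_cases hdef : pvIsDef l = true
      · have hstep : (l :: rest).foldl pvStepA (fs, [], false, pre) =
            rest.foldl pvStepA (fs, [l], true, pvIndent l) := by
          simp [List.foldl, pvStepA, hdef]
        rw [hstep, pv_foldl_inside]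
        rcases hscan : pvScanBody (pvIndent l) rest [l] with
          _ | ⟨grp, rest'⟩
        · simp only [hscan]
          simp only [pvOuter, hdef, if_true]
          split
          · rename_i g r hs
            rw [hscan] at hs; cases hs
          · simp
        · simp only [hscan]
          have hlt : rest'.length < rest.length :=
            pvScanBody_length_lt _ _ _ _ _ hscan
          have hle : rest'.length ≤ n := by
            have := Nat.succ_le_succ_iff.mp hlen
            omega
          rw [ih rest' hle]
          simp only [pvOuter, hdef, if_true]
          split
          · rename_i g r hs
            rw [hscan] at hs
            injection hs with hs'
            injection hs' with h1 h2
            subst h1; subst h2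
            simp [List.append_assoc]
          · rename_i hs
            rw [hscan] at hs; cases hs
      · have hstep : (l :: rest).foldl pvStepA (fs, [], false, pre) =
            rest.foldl pvStepA (fs, [], false, pre) := by
          simp [List.foldl, pvStepA, hdef]
        rw [hstep, ih rest (by simpa using Nat.succ_le_succ_iff.mp hlen)]
        simp [pvOuter, hdef]

-- ===== VERDICT (by name: the statement is the Claim_ definition above) =====
theorem extract_functions_from_code_rb_spec : Claim_equal_extract_functions_from_code_rb := by
  intro code _
  unfold Spec_extract_functions_from_code_rb extract_functions_from_code_rb
    extract_functions_from_code_rb_alt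
  simpa using pv_foldl_outer _ _ (Nat.le_refl _) [] 0
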